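-- pv_equiv track=rewrite | github.com/mxttttxzy/ai-study-assistant | backend/main.py | select_conversation_module
-- ===== SOURCE A (Python) =====
-- def select_conversation_module(user_message: str, user_character: dict) -> str:
--     """Select a conversation module based on user message and character."""
--     msg = user_message.lower()
--     if any(w in msg for w in ["study", "exam", "test", "homework", "assignment"]):
--         return "study_support"
--     if any(w in msg for w in ["stress", "anxiety", "overwhelmed", "pressure", "worried"]):
--         return "emotional_support"
--     if any(w in msg for w in ["motivation", "give up", "can't", "impossible", "hard"]):
--         return "motivation"
--     if any(w in msg for w in ["break", "rest", "tired", "burnout"]):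
--         return "wellbeing"
--     if any(w in msg for w in ["plan", "schedule", "organize", "manage", "time"]):
--         return "time_management"
--     if user_character["mood"] == "negative":
--         return "emotional_support"
--     return "general"
-- ===== SOURCE B (Python) =====
-- # Different algorithm: a flat keyword->priority map; collect the priorities of ALL
-- # keywords occurring in the lowered message and return the module of the minimum
-- # priority (no early exit, no per-row any-chain); fallback reads user_character["mood"].
-- _KEYWORD_PRIORITY = {
--     "study": 0, "exam": 0, "test": 0, "homework": 0, "assignment": 0,
--     "stress": 1, "anxiety": 1, "overwhelmed": 1, "pressure": 1, "worried": 1,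
--     "motivation": 2, "give up": 2, "can't": 2, "impossible": 2, "hard": 2,
--     "break": 3, "rest": 3, "tired": 3, "burnout": 3,
--     "plan": 4, "schedule": 4, "organize": 4, "manage": 4, "time": 4,
-- }
-- _MODULES = ["study_support", "emotional_support", "motivation", "wellbeing", "time_management"]
--
-- def select_conversation_module(user_message: str, user_character: dict) -> str:
--     """Select a conversation module based on user message and character."""
--     msg = user_message.lower()
--     hits = [p for k, p in _KEYWORD_PRIORITY.items() if k in msg]
--     if hits:
--         return _MODULES[min(hits)]
--     return "emotional_support" if user_character["mood"] == "negative" else "general"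
-- ===== Notes on version B (the rewrite author's own statement) =====
-- stated objective: alternative
-- what changed: Replaces the five short-circuiting if-any branches with a flat keyword-to-priority map: B collects the priorities of ALL keywords occurring in the lowered message and returns the module of the minimum priority, falling back to the mood check; Pre_ excludes inputs with no keyword match and no 'mood' key, where both A and B raise KeyError.
import Mathlib
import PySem

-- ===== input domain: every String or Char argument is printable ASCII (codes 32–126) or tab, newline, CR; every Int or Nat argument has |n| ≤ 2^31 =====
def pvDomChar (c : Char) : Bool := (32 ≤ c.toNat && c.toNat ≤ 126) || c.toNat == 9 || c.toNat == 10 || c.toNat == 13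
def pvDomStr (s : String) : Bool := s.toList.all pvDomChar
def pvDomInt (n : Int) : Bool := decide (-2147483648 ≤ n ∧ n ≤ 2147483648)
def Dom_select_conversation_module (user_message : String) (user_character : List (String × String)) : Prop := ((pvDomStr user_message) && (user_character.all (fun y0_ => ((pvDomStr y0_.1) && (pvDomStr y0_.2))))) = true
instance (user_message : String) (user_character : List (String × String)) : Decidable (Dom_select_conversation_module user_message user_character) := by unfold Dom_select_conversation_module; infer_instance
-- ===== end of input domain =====

-- B replaces A's five short-circuiting if-any branches by a flat keyword→priority map:
-- it collects the priorities of ALL matching keywords and returns the module of the minimum.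

-- ===== PORT A =====
-- Literal port of A's if-any chain; on a missing "mood" key Python raises KeyError,
-- the port returns "" there and Pre_ excludes those inputs.
def select_conversation_module (user_message : String) (user_character : List (String × String)) : String :=
  let msg := PySem.Str.lower user_message
  if ["study", "exam", "test", "homework", "assignment"].any (fun w => PySem.Str.isIn w msg) then
    "study_support"
  else if ["stress", "anxiety", "overwhelmed", "pressure", "worried"].any (fun w => PySem.Str.isIn w msg) then
    "emotional_support"
  else if ["motivation", "give up", "can't", "impossible", "hard"].any (fun w => PySem.Str.isIn w msg) then
    "motivation"
  else if ["break", "rest", "tired", "burnout"].any (fun w => PySem.Str.isIn w msg) then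
    "wellbeing"
  else if ["plan", "schedule", "organize", "manage", "time"].any (fun w => PySem.Str.isIn w msg) then
    "time_management"
  else
    match (PySem.Dict.mk user_character).get? "mood" with
    | some m => if m = "negative" then "emotional_support" else "general"
    | none => ""  -- KeyError in Python; outside Pre_

-- ===== PORT B =====
-- B: flat keyword→priority map; the comprehension collects every matching keyword's
-- priority; the module of the minimum priority is returned (no early exit, no row chain).
def pvKeywordPriority : List (String × Int) :=
  [ ("study", 0), ("exam", 0), ("test", 0), ("homework", 0), ("assignment", 0),
    ("stress", 1), ("anxiety", 1), ("overwhelmed", 1), ("pressure", 1), ("worried", 1),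
    ("motivation", 2), ("give up", 2), ("can't", 2), ("impossible", 2), ("hard", 2),
    ("break", 3), ("rest", 3), ("tired", 3), ("burnout", 3),
    ("plan", 4), ("schedule", 4), ("organize", 4), ("manage", 4), ("time", 4) ]

def pvModules : List String :=
  ["study_support", "emotional_support", "motivation", "wellbeing", "time_management"]

def select_conversation_module_alt (user_message : String) (user_character : List (String × String)) : String :=
  let msg := PySem.Str.lower user_message
  let hits := (pvKeywordPriority.filter (fun kp => PySem.Str.isIn kp.1 msg)).map Prod.snd
  match PySem.List.min? hits (fun x => x) with
  | some p => PySem.List.pyGetD pvModules p ""   -- _MODULES[min(hits)]; p is always 0..4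
  | none =>
    match (PySem.Dict.mk user_character).get? "mood" with
    | some m => if m = "negative" then "emotional_support" else "general"
    | none => ""  -- KeyError in Python; outside Pre_

-- ===== PRECONDITION & SPEC =====
-- Pre_ excludes exactly the inputs where no keyword occurs in the lowered message AND
-- the dict has no "mood" key: there both A and B raise KeyError.
def Pre_select_conversation_module (user_message : String) (user_character : List (String × String)) : Prop :=
  ((pvKeywordPriority.map Prod.fst).any
      (fun w => PySem.Str.isIn w (PySem.Str.lower user_message))) = true
  ∨ "mood" ∈ user_character.map Prod.fst
instance (user_message : String) (user_character : List (String × String)) : Decidable (Pre_select_conversation_module user_message user_character) := by unfold Pre_select_conversation_module; infer_instance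

def pvWitness_select_conversation_module : String × (List (String × String)) := ("hello", [("mood", "happy")])

def Spec_select_conversation_module (user_message : String) (user_character : List (String × String)) (out : String) : Prop := out = select_conversation_module_alt user_message user_character
instance (user_message : String) (user_character : List (String × String)) (out : String) : Decidable (Spec_select_conversation_module user_message user_character out) := by unfold Spec_select_conversation_module; infer_instance

-- ===== CLAIM (what is proved, stated in full; the proofs are below) =====
def Claim_equal_select_conversation_module : Prop := ∀ (user_message : String) (user_character : List (String × String)), Dom_select_conversation_module user_message user_character → Pre_select_conversation_module user_message user_character → Spec_select_conversation_module user_message user_character (select_conversation_module user_message user_character)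

-- ===== LEMMAS AND PROOFS =====

-- min? is determined by membership plus being a lower bound (value antisymmetry).
theorem pv_min?_eq_of_mem_of_le (xs : List Int) (i : Int)
    (hmem : i ∈ xs) (hle : ∀ b ∈ xs, i ≤ b) :
    PySem.List.min? xs (fun x => x) = some i := by
  cases h : PySem.List.min? xs (fun x => x) with
  | none =>
    rw [PySem.List.min?_eq_none_iff] at h
    subst h; simp at hmem
  | some m =>
    have h1 := PySem.List.min?_mem h
    have h2 := PySem.List.min?_isMin h i hmem
    have h3 : i ≤ m := hle m h1
    have h2' : m ≤ i := h2
    have : m = i := le_antisymm h2' h3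
    rw [this]

-- the hit list of B for a given lowered message
theorem pv_mem0 (msg : String)
    (h : (["study", "exam", "test", "homework", "assignment"].any (fun w => PySem.Str.isIn w msg)) = true) :
    (0:Int) ∈ (pvKeywordPriority.filter (fun kp => PySem.Str.isIn kp.1 msg)).map Prod.snd := by
  simp only [List.mem_map, List.mem_filter, pvKeywordPriority]
  simp at h ⊢; tauto

theorem pv_mem1 (msg : String)
    (h : (["stress", "anxiety", "overwhelmed", "pressure", "worried"].any (fun w => PySem.Str.isIn w msg)) = true) :
    (1:Int) ∈ (pvKeywordPriority.filter (fun kp => PySem.Str.isIn kp.1 msg)).map Prod.snd := by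
  simp only [List.mem_map, List.mem_filter, pvKeywordPriority]
  simp at h ⊢; tauto

theorem pv_mem2 (msg : String)
    (h : (["motivation", "give up", "can't", "impossible", "hard"].any (fun w => PySem.Str.isIn w msg)) = true) :
    (2:Int) ∈ (pvKeywordPriority.filter (fun kp => PySem.Str.isIn kp.1 msg)).map Prod.snd := by
  simp only [List.mem_map, List.mem_filter, pvKeywordPriority]
  simp at h ⊢; tauto

theorem pv_mem3 (msg : String)
    (h : (["break", "rest", "tired", "burnout"].any (fun w => PySem.Str.isIn w msg)) = true) :
    (3:Int) ∈ (pvKeywordPriority.filter (fun kp => PySem.Str.isIn kp.1 msg)).map Prod.snd := by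
  simp only [List.mem_map, List.mem_filter, pvKeywordPriority]
  simp at h ⊢; tauto

theorem pv_mem4 (msg : String)
    (h : (["plan", "schedule", "organize", "manage", "time"].any (fun w => PySem.Str.isIn w msg)) = true) :
    (4:Int) ∈ (pvKeywordPriority.filter (fun kp => PySem.Str.isIn kp.1 msg)).map Prod.snd := by
  simp only [List.mem_map, List.mem_filter, pvKeywordPriority]
  simp at h ⊢; tauto

theorem pv_lb0 (msg : String) (b : Int)
    (hb : b ∈ (pvKeywordPriority.filter (fun kp => PySem.Str.isIn kp.1 msg)).map Prod.snd) :
    (0:Int) ≤ b := by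
  simp only [List.mem_map, List.mem_filter, pvKeywordPriority] at hb
  simp at hb
  obtain ⟨a, hmem, hb2⟩ := hb
  rcases hmem with ⟨rfl,rfl⟩|⟨rfl,rfl⟩|⟨rfl,rfl⟩|⟨rfl,rfl⟩|⟨rfl,rfl⟩|⟨rfl,rfl⟩|⟨rfl,rfl⟩|⟨rfl,rfl⟩|⟨rfl,rfl⟩|⟨rfl,rfl⟩|⟨rfl,rfl⟩|⟨rfl,rfl⟩|⟨rfl,rfl⟩|⟨rfl,rfl⟩|⟨rfl,rfl⟩|⟨rfl,rfl⟩|⟨rfl,rfl⟩|⟨rfl,rfl⟩|⟨rfl,rfl⟩|⟨rfl,rfl⟩|⟨rfl,rfl⟩|⟨rfl,rfl⟩|⟨rfl,rfl⟩|⟨rfl,rfl⟩ <;> simp_all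

theorem pv_lb1 (msg : String) (b : Int)
    (h1 : (["study", "exam", "test", "homework", "assignment"].any (fun w => PySem.Str.isIn w msg)) = false)
    (hb : b ∈ (pvKeywordPriority.filter (fun kp => PySem.Str.isIn kp.1 msg)).map Prod.snd) :
    (1:Int) ≤ b := by
  simp only [List.mem_map, List.mem_filter, pvKeywordPriority] at hb
  simp at hb h1
  obtain ⟨a, hmem, hb2⟩ := hb
  rcases hmem with ⟨rfl,rfl⟩|⟨rfl,rfl⟩|⟨rfl,rfl⟩|⟨rfl,rfl⟩|⟨rfl,rfl⟩|⟨rfl,rfl⟩|⟨rfl,rfl⟩|⟨rfl,rfl⟩|⟨rfl,rfl⟩|⟨rfl,rfl⟩|⟨rfl,rfl⟩|⟨rfl,rfl⟩|⟨rfl,rfl⟩|⟨rfl,rfl⟩|⟨rfl,rfl⟩|⟨rfl,rfl⟩|⟨rfl,rfl⟩|⟨rfl,rfl⟩|⟨rfl,rfl⟩|⟨rfl,rfl⟩|⟨rfl,rfl⟩|⟨rfl,rfl⟩|⟨rfl,rfl⟩|⟨rfl,rfl⟩ <;> simp_all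

theorem pv_lb2 (msg : String) (b : Int)
    (h1 : (["study", "exam", "test", "homework", "assignment"].any (fun w => PySem.Str.isIn w msg)) = false)
    (h2 : (["stress", "anxiety", "overwhelmed", "pressure", "worried"].any (fun w => PySem.Str.isIn w msg)) = false)
    (hb : b ∈ (pvKeywordPriority.filter (fun kp => PySem.Str.isIn kp.1 msg)).map Prod.snd) :
    (2:Int) ≤ b := by
  simp only [List.mem_map, List.mem_filter, pvKeywordPriority] at hb
  simp at hb h1 h2
  obtain ⟨a, hmem, hb2⟩ := hb
  rcases hmem with ⟨rfl,rfl⟩|⟨rfl,rfl⟩|⟨rfl,rfl⟩|⟨rfl,rfl⟩|⟨rfl,rfl⟩|⟨rfl,rfl⟩|⟨rfl,rfl⟩|⟨rfl,rfl⟩|⟨rfl,rfl⟩|⟨rfl,rfl⟩|⟨rfl,rfl⟩|⟨rfl,rfl⟩|⟨rfl,rfl⟩|⟨rfl,rfl⟩|⟨rfl,rfl⟩|⟨rfl,rfl⟩|⟨rfl,rfl⟩|⟨rfl,rfl⟩|⟨rfl,rfl⟩|⟨rfl,rfl⟩|⟨rfl,rfl⟩|⟨rfl,rfl⟩|⟨rfl,rfl⟩|⟨rfl,rfl⟩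 <;> simp_all

theorem pv_lb3 (msg : String) (b : Int)
    (h1 : (["study", "exam", "test", "homework", "assignment"].any (fun w => PySem.Str.isIn w msg)) = false)
    (h2 : (["stress", "anxiety", "overwhelmed", "pressure", "worried"].any (fun w => PySem.Str.isIn w msg)) = false)
    (h3 : (["motivation", "give up", "can't", "impossible", "hard"].any (fun w => PySem.Str.isIn w msg)) = false)
    (hb : b ∈ (pvKeywordPriority.filter (fun kp => PySem.Str.isIn kp.1 msg)).map Prod.snd) :
    (3:Int) ≤ b := by
  simp only [List.mem_map, List.mem_filter, pvKeywordPriority] at hb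
  simp at hb h1 h2 h3
  obtain ⟨a, hmem, hb2⟩ := hb
  rcases hmem with ⟨rfl,rfl⟩|⟨rfl,rfl⟩|⟨rfl,rfl⟩|⟨rfl,rfl⟩|⟨rfl,rfl⟩|⟨rfl,rfl⟩|⟨rfl,rfl⟩|⟨rfl,rfl⟩|⟨rfl,rfl⟩|⟨rfl,rfl⟩|⟨rfl,rfl⟩|⟨rfl,rfl⟩|⟨rfl,rfl⟩|⟨rfl,rfl⟩|⟨rfl,rfl⟩|⟨rfl,rfl⟩|⟨rfl,rfl⟩|⟨rfl,rfl⟩|⟨rfl,rfl⟩|⟨rfl,rfl⟩|⟨rfl,rfl⟩|⟨rfl,rfl⟩|⟨rfl,rfl⟩|⟨rfl,rfl⟩ <;> simp_all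

theorem pv_lb4 (msg : String) (b : Int)
    (h1 : (["study", "exam", "test", "homework", "assignment"].any (fun w => PySem.Str.isIn w msg)) = false)
    (h2 : (["stress", "anxiety", "overwhelmed", "pressure", "worried"].any (fun w => PySem.Str.isIn w msg)) = false)
    (h3 : (["motivation", "give up", "can't", "impossible", "hard"].any (fun w => PySem.Str.isIn w msg)) = false)
    (h4 : (["break", "rest", "tired", "burnout"].any (fun w => PySem.Str.isIn w msg)) = false)
    (hb : b ∈ (pvKeywordPriority.filter (fun kp => PySem.Str.isIn kp.1 msg)).map Prod.snd) :
    (4:Int) ≤ b := by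
  simp only [List.mem_map, List.mem_filter, pvKeywordPriority] at hb
  simp at hb h1 h2 h3 h4
  obtain ⟨a, hmem, hb2⟩ := hb
  rcases hmem with ⟨rfl,rfl⟩|⟨rfl,rfl⟩|⟨rfl,rfl⟩|⟨rfl,rfl⟩|⟨rfl,rfl⟩|⟨rfl,rfl⟩|⟨rfl,rfl⟩|⟨rfl,rfl⟩|⟨rfl,rfl⟩|⟨rfl,rfl⟩|⟨rfl,rfl⟩|⟨rfl,rfl⟩|⟨rfl,rfl⟩|⟨rfl,rfl⟩|⟨rfl,rfl⟩|⟨rfl,rfl⟩|⟨rfl,rfl⟩|⟨rfl,rfl⟩|⟨rfl,rfl⟩|⟨rfl,rfl⟩|⟨rfl,rfl⟩|⟨rfl,rfl⟩|⟨rfl,rfl⟩|⟨rfl,rfl⟩ <;> simp_all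

theorem pv_nil (msg : String)
    (h1 : (["study", "exam", "test", "homework", "assignment"].any (fun w => PySem.Str.isIn w msg)) = false)
    (h2 : (["stress", "anxiety", "overwhelmed", "pressure", "worried"].any (fun w => PySem.Str.isIn w msg)) = false)
    (h3 : (["motivation", "give up", "can't", "impossible", "hard"].any (fun w => PySem.Str.isIn w msg)) = false)
    (h4 : (["break", "rest", "tired", "burnout"].any (fun w => PySem.Str.isIn w msg)) = false)
    (h5 : (["plan", "schedule", "organize", "manage", "time"].any (fun w => PySem.Str.isIn w msg)) = false) :
    (pvKeywordPriority.filter (fun kp => PySem.Str.isIn kp.1 msg)).map Prod.snd = [] := by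
  simp only [pvKeywordPriority, List.map_eq_nil_iff, List.filter_eq_nil_iff]
  simp at h1 h2 h3 h4 h5 ⊢
  tauto

-- ===== VERDICT (by name: the statement is the Claim_ definition above) =====
theorem select_conversation_module_spec : Claim_equal_select_conversation_module := by
  intro u c _ _
  simp only [Spec_select_conversation_module, select_conversation_module, select_conversation_module_alt]
  by_cases h1 : (["study", "exam", "test", "homework", "assignment"].any (fun w => PySem.Str.isIn w (PySem.Str.lower u))) = true
  · rw [pv_min?_eq_of_mem_of_le _ 0 (pv_mem0 _ h1) (fun b hb => pv_lb0 _ b hb)]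
    simp only [h1, if_true]
    decide
  · rw [Bool.not_eq_true] at h1
    by_cases h2 : (["stress", "anxiety", "overwhelmed", "pressure", "worried"].any (fun w => PySem.Str.isIn w (PySem.Str.lower u))) = true
    · rw [pv_min?_eq_of_mem_of_le _ 1 (pv_mem1 _ h2) (fun b hb => pv_lb1 _ b h1 hb)]
      simp only [h1, h2, if_true, Bool.false_eq_true, if_false]
      decide
    · rw [Bool.not_eq_true] at h2
      by_cases h3 : (["motivation", "give up", "can't", "impossible", "hard"].any (fun w => PySem.Str.isIn w (PySem.Str.lower u))) = true
      · rw [pv_min?_eq_of_mem_of_le _ 2 (pv_mem2 _ h3) (fun b hb => pv_lb2 _ b h1 h2 hb)]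
        simp only [h1, h2, h3, if_true, Bool.false_eq_true, if_false]
        decide
      · rw [Bool.not_eq_true] at h3
        by_cases h4 : (["break", "rest", "tired", "burnout"].any (fun w => PySem.Str.isIn w (PySem.Str.lower u))) = true
        · rw [pv_min?_eq_of_mem_of_le _ 3 (pv_mem3 _ h4) (fun b hb => pv_lb3 _ b h1 h2 h3 hb)]
          simp only [h1, h2, h3, h4, if_true, Bool.false_eq_true, if_false]
          decide
        · rw [Bool.not_eq_true] at h4
          by_cases h5 : (["plan", "schedule", "organize", "manage", "time"].any (fun w => PySem.Str.isIn w (PySem.Str.lower u))) = true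
          · rw [pv_min?_eq_of_mem_of_le _ 4 (pv_mem4 _ h5) (fun b hb => pv_lb4 _ b h1 h2 h3 h4 hb)]
            simp only [h1, h2, h3, h4, h5, if_true, Bool.false_eq_true, if_false]
            decide
          · rw [Bool.not_eq_true] at h5
            rw [pv_nil _ h1 h2 h3 h4 h5]
            simp only [h1, h2, h3, h4, h5, Bool.false_eq_true, if_false]
            rfl
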